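-- pv_equiv track=rewrite | github.com/Tilk95/DYdelthatools | dytools.py | fct_txt_to_mask
-- ===== SOURCE A (Python) =====
-- def fct_txt_to_mask(p_text:str,p_dico):
--     _tab_parametres = p_text.strip().upper().split("+")
--     _int_mask = 0
--
--     for parametre in _tab_parametres:
--         for j, (idx,key) in enumerate(p_dico.items()):
--             if (parametre == key):
--                 if (idx>=0 and idx<=31):
--                     _int_mask = _int_mask|(2**(31-idx))
--                     break
--     return _int_mask
-- ===== SOURCE B (Python) =====
-- def fct_txt_to_mask(p_text:str,p_dico):
--     params = set(p_text.strip().upper().split("+"))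
--     seen = set()
--     _int_mask = 0
--     for idx, key in p_dico.items():
--         if 0 <= idx <= 31 and key in params and key not in seen:
--             _int_mask |= 1 << (31 - idx)
--             seen.add(key)
--     return _int_mask
-- ===== Notes on version B (the rewrite author's own statement) =====
-- stated objective: alternative
-- what changed: Inverts the traversal: instead of scanning the whole dict for each '+'-token (nested loops with break), B builds the token set once and makes a single pass over the dict, using a 'seen' set of already-matched key values to reproduce the first-valid-index-per-value behaviour.
import Mathlib
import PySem

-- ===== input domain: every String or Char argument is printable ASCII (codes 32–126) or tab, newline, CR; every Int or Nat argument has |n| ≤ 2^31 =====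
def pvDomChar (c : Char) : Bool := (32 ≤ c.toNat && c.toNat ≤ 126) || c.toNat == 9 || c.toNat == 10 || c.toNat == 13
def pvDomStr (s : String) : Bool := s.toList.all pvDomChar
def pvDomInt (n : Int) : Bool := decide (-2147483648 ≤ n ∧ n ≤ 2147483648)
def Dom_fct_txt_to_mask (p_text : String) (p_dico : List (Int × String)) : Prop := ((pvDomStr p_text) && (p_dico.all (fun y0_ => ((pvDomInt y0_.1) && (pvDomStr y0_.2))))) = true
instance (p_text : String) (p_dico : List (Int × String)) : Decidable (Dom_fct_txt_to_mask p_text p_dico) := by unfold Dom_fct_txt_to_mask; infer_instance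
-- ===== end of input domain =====

-- B inverts A's traversal: one pass over the dict with a 'seen' set instead of a scan of the
-- whole dict per '+'-token; same return value (objective: alternative decomposition, not speed).

-- ===== PORT A =====
-- s.split("+"): split? is some here since the separator "+" is non-empty (getD [] is never taken)
-- inner 'for j, (idx, key) in enumerate(p_dico.items()): …' with break (j is unused)
def pvInnerA (parametre : String) (m : Int) : List (Int × String) → Int
  | [] => m
  | (idx, key) :: rest =>
      if parametre = key then
        if 0 ≤ idx ∧ idx ≤ 31 then PySem.Int.bor m ((2 : Int) ^ (31 - idx).toNat)
        else pvInnerA parametre m rest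
      else pvInnerA parametre m rest

-- p_dico is a Python dict: its items are the association list after dict()'s
-- overwrite-in-place collapse of duplicate keys (PySem.Dict.ofList), in both ports.
def fct_txt_to_mask (p_text : String) (p_dico : List (Int × String)) : Int :=
  let _tab_parametres := (PySem.Str.split? (PySem.Str.upper (PySem.Str.strip p_text)) "+").getD []
  _tab_parametres.foldl (fun m parametre => pvInnerA parametre m (PySem.Dict.ofList p_dico).items) 0

-- ===== PORT B =====
def fct_txt_to_mask_alt (p_text : String) (p_dico : List (Int × String)) : Int :=
  let params : PySem.Set String :=
    PySem.Set.ofList ((PySem.Str.split? (PySem.Str.upper (PySem.Str.strip p_text)) "+").getD [])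
  ((PySem.Dict.ofList p_dico).items.foldl
    (fun (st : Int × PySem.Set String) (p : Int × String) =>
      if decide (0 ≤ p.1) && decide (p.1 ≤ 31) && PySem.Set.contains params p.2
          && !(PySem.Set.contains st.2 p.2)
      then (PySem.Int.bor st.1 ((1 : Int) <<< (31 - p.1).toNat), PySem.Set.add st.2 p.2)
      else st)
    (0, PySem.Set.empty)).1

-- ===== PRECONDITION & SPEC =====
def Spec_fct_txt_to_mask (p_text : String) (p_dico : List (Int × String)) (out : Int) : Prop := out = fct_txt_to_mask_alt p_text p_dico
instance (p_text : String) (p_dico : List (Int × String)) (out : Int) : Decidable (Spec_fct_txt_to_mask p_text p_dico out) := by unfold Spec_fct_txt_to_mask; infer_instance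

-- ===== CLAIM (what is proved, stated in full; the proofs are below) =====
def Claim_equal_fct_txt_to_mask : Prop := ∀ (p_text : String) (p_dico : List (Int × String)), Dom_fct_txt_to_mask p_text p_dico → Spec_fct_txt_to_mask p_text p_dico (fct_txt_to_mask p_text p_dico)

-- ===== LEMMAS AND PROOFS =====

-- contribution of one token v: the bit of the first in-range entry of d whose value is v (Nat shadow)
def pvGN (v : String) : List (Int × String) → Nat
  | [] => 0
  | (idx, key) :: r => if v = key ∧ 0 ≤ idx ∧ idx ≤ 31 then 2 ^ (31 - idx).toNat else pvGN v r

-- OR of the contributions of a list of tokens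
def pvOrN (d : List (Int × String)) (ts : List String) : Nat :=
  ts.foldr (fun t a => pvGN t d ||| a) 0

-- Nat shadow of B's single pass
def pvKN (P : PySem.Set String) : List (Int × String) → PySem.Set String → Nat
  | [], _ => 0
  | (i, k) :: r, s =>
      if decide (0 ≤ i) && decide (i ≤ 31) && PySem.Set.contains P k && !(PySem.Set.contains s k)
      then (2 ^ (31 - i).toNat) ||| pvKN P r (PySem.Set.add s k)
      else pvKN P r s

theorem pv_one_shiftLeft (n : Nat) : (1 : Int) <<< n = ((2 ^ n : Nat) : Int) := by
  rw [Int.shiftLeft_eq]; push_cast; ring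

theorem pv_innerA_eq (t : String) (d : List (Int × String)) (mn : Nat) :
    pvInnerA t (mn : Int) d = ((mn ||| pvGN t d : Nat) : Int) := by
  induction d with
  | nil => simp [pvInnerA, pvGN]
  | cons p r ih =>
    obtain ⟨idx, key⟩ := p
    show (if t = key then if 0 ≤ idx ∧ idx ≤ 31 then PySem.Int.bor (mn : Int) ((2 : Int) ^ (31 - idx).toNat)
            else pvInnerA t (mn : Int) r
          else pvInnerA t (mn : Int) r)
        = ((mn ||| (if t = key ∧ 0 ≤ idx ∧ idx ≤ 31 then 2 ^ (31 - idx).toNat else pvGN t r) : Nat) : Int)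
    by_cases hk : t = key
    · by_cases hr : 0 ≤ idx ∧ idx ≤ 31
      · rw [if_pos hk, if_pos hr, if_pos ⟨hk, hr⟩]
        have h2 : ((2 : Int) ^ (31 - idx).toNat) = (((2 ^ (31 - idx).toNat : Nat)) : Int) := by
          push_cast; ring
        rw [h2, PySem.Int.bor_natCast]
      · rw [if_pos hk, if_neg hr, if_neg (by tauto), ih]
    · rw [if_neg hk, if_neg (by tauto), ih]

theorem pv_foldA_eq (d : List (Int × String)) (ts : List String) (mn : Nat) :
    ts.foldl (fun m parametre => pvInnerA parametre m d) (mn : Int) = ((mn ||| pvOrN d ts : Nat) : Int) := by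
  induction ts generalizing mn with
  | nil => simp [pvOrN]
  | cons t ts ih =>
    rw [List.foldl_cons, pv_innerA_eq, ih]
    simp only [pvOrN, List.foldr_cons, Nat.lor_assoc]

theorem pvOrN_nil (ts : List String) : pvOrN [] ts = 0 := by
  induction ts with
  | nil => rfl
  | cons t ts _ => simp [pvOrN, pvGN]

theorem pvOrN_absorb (d : List (Int × String)) {v : String} {ts : List String} (h : v ∈ ts) :
    pvGN v d ||| pvOrN d ts = pvOrN d ts := by
  induction ts with
  | nil => cases h
  | cons t ts ih =>
    rcases List.mem_cons.mp h with h1 | h2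
    · subst h1
      simp only [pvOrN, List.foldr_cons, ← Nat.lor_assoc, Nat.or_self]
    · simp only [pvOrN, List.foldr_cons] at ih ⊢
      rw [← Nat.lor_assoc, Nat.lor_comm (pvGN v d) (pvGN t d), Nat.lor_assoc, ih h2]

theorem pvOrN_perm (d : List (Int × String)) {l1 l2 : List String} (h : l1.Perm l2) :
    pvOrN d l1 = pvOrN d l2 := by
  induction h with
  | nil => rfl
  | cons x _ ih => simp only [pvOrN, List.foldr_cons] at ih ⊢; rw [ih]
  | swap x y l =>
    simp only [pvOrN, List.foldr_cons, ← Nat.lor_assoc, Nat.lor_comm (pvGN y d) (pvGN x d)]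
  | trans _ _ ih1 ih2 => rw [ih1, ih2]

theorem pvOrN_congr {d1 d2 : List (Int × String)} (ts : List String)
    (h : ∀ v ∈ ts, pvGN v d1 = pvGN v d2) : pvOrN d1 ts = pvOrN d2 ts := by
  induction ts with
  | nil => rfl
  | cons t ts ih =>
    simp only [pvOrN, List.foldr_cons]
    rw [h t (List.mem_cons_self ..)]
    exact congrArg (fun x => pvGN t d2 ||| x) (ih (fun v hv => h v (List.mem_cons_of_mem _ hv)))

theorem pvOrN_dedup (d : List (Int × String)) (ts : List String) :
    pvOrN d ts = pvOrN d ts.dedup := by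
  induction ts with
  | nil => rfl
  | cons t ts ih =>
    by_cases h : t ∈ ts
    · rw [List.dedup_cons_of_mem h, ← ih]
      simp only [pvOrN, List.foldr_cons]
      exact pvOrN_absorb d h
    · rw [List.dedup_cons_of_notMem h]
      simp only [pvOrN, List.foldr_cons]
      exact congrArg (fun x => pvGN t d ||| x) ih

theorem pvOrN_ofList (d : List (Int × String)) (ts : List String) :
    pvOrN d ts = pvOrN d (PySem.Set.ofList ts) := by
  rw [pvOrN_dedup]
  refine pvOrN_perm d ((List.perm_ext_iff_of_nodup (List.nodup_dedup ts) (PySem.Set.nodup_ofList ts)).mpr ?_)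
  intro a
  rw [List.mem_dedup, PySem.Set.mem_ofList]

theorem pv_foldB_eq (P : PySem.Set String) (d : List (Int × String)) (mn : Nat) (s : PySem.Set String) :
    (d.foldl
      (fun (st : Int × PySem.Set String) (p : Int × String) =>
        if decide (0 ≤ p.1) && decide (p.1 ≤ 31) && PySem.Set.contains P p.2
            && !(PySem.Set.contains st.2 p.2)
        then (PySem.Int.bor st.1 ((1 : Int) <<< (31 - p.1).toNat), PySem.Set.add st.2 p.2)
        else st)
      ((mn : Int), s)).1 = ((mn ||| pvKN P d s : Nat) : Int) := by
  induction d generalizing mn s with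
  | nil => simp [pvKN]
  | cons p r ih =>
    obtain ⟨i, k⟩ := p
    rw [List.foldl_cons]
    simp only []
    by_cases hc : (decide (0 ≤ i) && decide (i ≤ 31) && PySem.Set.contains P k
        && !(PySem.Set.contains s k)) = true
    · rw [if_pos hc, pv_one_shiftLeft, PySem.Int.bor_natCast, ih]
      show _ = ((mn ||| pvKN P ((i, k) :: r) s : Nat) : Int)
      rw [pvKN, if_pos hc, Nat.lor_assoc]
    · rw [if_neg hc, ih]
      show _ = ((mn ||| pvKN P ((i, k) :: r) s : Nat) : Int)
      rw [pvKN, if_neg hc]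

theorem pvKN_eq_pvOrN (P : PySem.Set String) (hP : P.Nodup) (d : List (Int × String)) (s : PySem.Set String) :
    pvKN P d s = pvOrN d (P.filter (fun v => !(PySem.Set.contains s v))) := by
  induction d generalizing s with
  | nil => rw [pvOrN_nil]; rfl
  | cons p r ih =>
    obtain ⟨i, k⟩ := p
    by_cases hc : (decide (0 ≤ i) && decide (i ≤ 31) && PySem.Set.contains P k
        && !(PySem.Set.contains s k)) = true
    · have hparts := hc
      simp only [Bool.and_eq_true, decide_eq_true_eq, Bool.not_eq_true',
        PySem.Set.contains_iff] at hparts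
      obtain ⟨⟨⟨h0, h31⟩, hkP⟩, hks⟩ := hparts
      have hksm : k ∉ s := by
        intro hm
        rw [(PySem.Set.contains_iff s k).mpr hm] at hks
        cases hks
      have hLnd : (P.filter (fun v => !(PySem.Set.contains s v))).Nodup := hP.filter _
      have hkL : k ∈ P.filter (fun v => !(PySem.Set.contains s v)) :=
        List.mem_filter.mpr ⟨hkP, by rw [hks]; rfl⟩
      have e1 : pvOrN ((i, k) :: r) (P.filter (fun v => !(PySem.Set.contains s v)))
          = pvGN k ((i, k) :: r)
            ||| pvOrN ((i, k) :: r) ((P.filter (fun v => !(PySem.Set.contains s v))).erase k) := by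
        rw [pvOrN_perm _ (List.perm_cons_erase hkL)]; rfl
      have e2 : pvGN k ((i, k) :: r) = 2 ^ (31 - i).toNat := by
        rw [pvGN, if_pos ⟨rfl, h0, h31⟩]
      have e3 : pvOrN ((i, k) :: r) ((P.filter (fun v => !(PySem.Set.contains s v))).erase k)
          = pvOrN r ((P.filter (fun v => !(PySem.Set.contains s v))).erase k) := by
        refine pvOrN_congr _ (fun v hv => ?_)
        have hvne : v ≠ k := ((hLnd.mem_erase_iff).mp hv).1
        rw [pvGN, if_neg (by tauto)]
      have e4 : (P.filter (fun v => !(PySem.Set.contains s v))).erase k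
          = P.filter (fun v => !(PySem.Set.contains (PySem.Set.add s k) v)) := by
        rw [hLnd.erase_eq_filter k, List.filter_filter]
        refine List.filter_congr (fun v hv => ?_)
        simp [PySem.Set.add_of_not_mem hksm, PySem.Set.contains_eq_listContains,
          Bool.and_comm, bne, beq_eq_decide]
      rw [pvKN, if_pos hc, ih (PySem.Set.add s k), e1, e2, e3, e4]
    · rw [pvKN, if_neg hc, ih s]
      refine pvOrN_congr _ (fun v hv => ?_)
      obtain ⟨hvP, hvs⟩ := List.mem_filter.mp hv
      by_cases hvk : v = k
      · subst hvk
        have : ¬(0 ≤ i ∧ i ≤ 31) := by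
          intro ⟨h0, h31⟩
          apply hc
          simp only [Bool.and_eq_true, decide_eq_true_eq, PySem.Set.contains_iff]
          exact ⟨⟨⟨h0, h31⟩, hvP⟩, by simp_all⟩
        rw [pvGN, if_neg (by tauto)]
      · rw [pvGN, if_neg (by tauto)]

-- ===== VERDICT (by name: the statement is the Claim_ definition above) =====
theorem fct_txt_to_mask_spec : Claim_equal_fct_txt_to_mask := by
  intro p_text p_dico _
  unfold Spec_fct_txt_to_mask fct_txt_to_mask fct_txt_to_mask_alt
  have hA := pv_foldA_eq (PySem.Dict.ofList p_dico).items
      ((PySem.Str.split? (PySem.Str.upper (PySem.Str.strip p_text)) "+").getD []) 0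
  have hB := pv_foldB_eq
      (PySem.Set.ofList ((PySem.Str.split? (PySem.Str.upper (PySem.Str.strip p_text)) "+").getD []))
      (PySem.Dict.ofList p_dico).items 0 PySem.Set.empty
  simp only [Nat.cast_zero, Nat.zero_or] at hA hB
  simp only [hA, hB]
  rw [pvKN_eq_pvOrN _ (PySem.Set.nodup_ofList _) _ _]
  have hfilter : (PySem.Set.ofList
        ((PySem.Str.split? (PySem.Str.upper (PySem.Str.strip p_text)) "+").getD [])).filter
        (fun v => !(PySem.Set.contains PySem.Set.empty v)) =
      PySem.Set.ofList ((PySem.Str.split? (PySem.Str.upper (PySem.Str.strip p_text)) "+").getD []) :=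
    List.filter_eq_self.mpr (fun v _ => rfl)
  rw [hfilter, ← pvOrN_ofList]
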